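-- pv_equiv track=rewrite | github.com/aidancurtis/atommovr | atommover/algorithms/source/bc_new.py | get_all_balance_assignments
-- ===== SOURCE A (Python) =====
-- def get_all_balance_assignments(start, end):
--     assignments = []
--     i = start
--     j = end
--     new_assignments = [(i, j)]
--     n_a = len(new_assignments)
--     while n_a > 0:
--         assignment_list = []
--         for assignment in new_assignments:
--             i = assignment[0]
--             j = assignment[1]
--             next_layer = get_next_balance_assignment(i, j)
--             assignment_list.extend(next_layer)
--         assignments.extend(new_assignments)
--         if len(assignment_list) > 0:
--             new_assignments = assignment_list
--         else:
--             break
--     return assignments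
--
-- def get_next_balance_assignment(i, j):
--     l = j - i + 1
--     m = i + (l // 2)
--     next_list = []
--     if i != j and i < j:
--         next_list.append((i, m - 1))
--         next_list.append((m, j))
--     return next_list
-- ===== SOURCE B (Python) =====
-- def get_all_balance_assignments(start, end):
--     # Recursive divide-and-conquer: build per-depth layer lists and merge them
--     # (different decomposition from A's iterative BFS queue loop).
--     result = []
--     for level in _layers(start, end):
--         result.extend(level)
--     return result
--
-- def _layers(i, j):
--     if i < j:
--         m = i + (j - i + 1) // 2
--         return [[(i, j)]] + _merge_layers(_layers(i, m - 1), _layers(m, j))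
--     return [[(i, j)]]
--
-- def _merge_layers(a, b):
--     out = [x + y for x, y in zip(a, b)]
--     if len(a) > len(b):
--         out += a[len(b):]
--     else:
--         out += b[len(a):]
--     return out
-- ===== Notes on version B (the rewrite author's own statement) =====
-- stated objective: alternative
-- what changed: A runs an iterative BFS over a queue of intervals, extending the output layer by layer; B recursively builds per-depth layer lists for each subtree and merges the two children's layer lists depth-wise, then flattens.
import Mathlib
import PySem

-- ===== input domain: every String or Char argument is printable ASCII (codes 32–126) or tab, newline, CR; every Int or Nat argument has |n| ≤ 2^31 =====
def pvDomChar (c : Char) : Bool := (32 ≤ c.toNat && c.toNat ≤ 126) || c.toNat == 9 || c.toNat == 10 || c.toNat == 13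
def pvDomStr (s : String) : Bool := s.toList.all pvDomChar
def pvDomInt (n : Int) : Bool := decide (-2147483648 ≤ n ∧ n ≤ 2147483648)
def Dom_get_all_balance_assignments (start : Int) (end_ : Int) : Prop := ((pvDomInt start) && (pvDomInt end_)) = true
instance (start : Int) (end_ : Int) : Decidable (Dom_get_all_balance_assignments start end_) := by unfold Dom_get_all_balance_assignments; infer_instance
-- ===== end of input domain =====

-- B replaces A's iterative BFS queue loop with a recursive per-depth layer construction
-- (merge the children's layer lists depth-wise, then flatten): an alternative decomposition.


-- ===== PORT A =====
-- get_next_balance_assignment(i, j)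
def nextAssign (i j : Int) : List (Int × Int) :=
  let l := j - i + 1
  let m := i + PySem.Int.floordiv l 2
  if i ≠ j ∧ i < j then [(i, m - 1), (m, j)] else []

-- measure for the while loop's termination: total "width" of the pending intervals
def pvMsum (xs : List (Int × Int)) : Nat := (xs.map (fun p => (p.2 - p.1).toNat)).sum

lemma pvMsum_nextAssign_le (i j : Int) : pvMsum (nextAssign i j) ≤ (j - i).toNat := by
  unfold nextAssign pvMsum
  split
  · next h =>
    have h2 : (0:Int) < 2 := by norm_num
    simp only [List.map, List.sum_cons, List.sum_nil]
    rw [PySem.Int.floordiv_eq_ediv_of_pos h2]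
    omega
  · simp

lemma pvMsum_nextAssign_lt (i j : Int) (h : nextAssign i j ≠ []) :
    pvMsum (nextAssign i j) < (j - i).toNat := by
  unfold nextAssign at h ⊢
  unfold pvMsum
  split
  · next hc =>
    have h2 : (0:Int) < 2 := by norm_num
    simp only [List.map, List.sum_cons, List.sum_nil]
    rw [PySem.Int.floordiv_eq_ediv_of_pos h2]
    omega
  · next hc => simp [hc] at h

def pvNextL (xs : List (Int × Int)) : List (Int × Int) :=
  xs.flatMap (fun a => nextAssign a.1 a.2)

lemma pvMsum_append (xs ys : List (Int × Int)) :
    pvMsum (xs ++ ys) = pvMsum xs + pvMsum ys := by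
  unfold pvMsum; simp

lemma pvMsum_nextL_le (xs : List (Int × Int)) : pvMsum (pvNextL xs) ≤ pvMsum xs := by
  induction xs with
  | nil => simp [pvNextL, pvMsum]
  | cons p xs ih =>
    have h1 := pvMsum_nextAssign_le p.1 p.2
    calc pvMsum (pvNextL (p :: xs)) = pvMsum (nextAssign p.1 p.2) + pvMsum (pvNextL xs) := by
          simp [pvNextL, pvMsum_append]
      _ ≤ (p.2 - p.1).toNat + pvMsum xs := by omega
      _ = pvMsum (p :: xs) := by simp [pvMsum]

lemma pvMsum_nextL_lt (xs : List (Int × Int)) (h : pvNextL xs ≠ []) :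
    pvMsum (pvNextL xs) < pvMsum xs := by
  induction xs with
  | nil => simp [pvNextL] at h
  | cons p xs ih =>
    have hsplit : pvNextL (p :: xs) = nextAssign p.1 p.2 ++ pvNextL xs := by
      simp [pvNextL]
    by_cases hp : nextAssign p.1 p.2 = []
    · have hxs : pvNextL xs ≠ [] := by
        intro hc; rw [hsplit, hp, hc] at h; exact h rfl
      have h4 := ih hxs
      have h3 : pvMsum (p :: xs) = (p.2 - p.1).toNat + pvMsum xs := by
        simp [pvMsum]
      rw [hsplit, pvMsum_append, hp, h3]
      have h5 : pvMsum ([] : List (Int × Int)) = 0 := by simp [pvMsum]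
      rw [h5]
      omega
    · have h1 := pvMsum_nextAssign_lt p.1 p.2 hp
      have h2 := pvMsum_nextL_le xs
      have h3 : pvMsum (p :: xs) = (p.2 - p.1).toNat + pvMsum xs := by
        simp [pvMsum]
      rw [hsplit, pvMsum_append, h3]
      omega

-- the inner for loop of A: assignment_list accumulated by extend
def buildNext (new_ : List (Int × Int)) : List (Int × Int) :=
  new_.foldl (fun al a => al ++ nextAssign a.1 a.2) []

lemma buildNext_eq (xs : List (Int × Int)) : buildNext xs = pvNextL xs := by
  unfold buildNext
  rw [PySem.List.foldl_append_eq_flatMap]; rfl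

-- the while loop of A: acc = assignments, new_ = new_assignments
def loopA (acc new_ : List (Int × Int)) : List (Int × Int) :=
  let assignment_list := buildNext new_
  let acc' := acc ++ new_
  if 0 < assignment_list.length then loopA acc' assignment_list else acc'
termination_by pvMsum new_
decreasing_by
  rename_i hlen
  have hlen' : 0 < (pvNextL new_).length := by rw [← buildNext_eq]; exact hlen
  rw [buildNext_eq]
  exact pvMsum_nextL_lt new_ (fun hc => by simp [hc] at hlen')

def get_all_balance_assignments (start : Int) (end_ : Int) : List (Int × Int) :=
  let assignments : List (Int × Int) := []
  let new_assignments := [(start, end_)]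
  let n_a := new_assignments.length
  if 0 < n_a then loopA assignments new_assignments else assignments

-- ===== PORT B =====
lemma pvSplitL_lt (i j : Int) (h : i < j) :
    (i + PySem.Int.floordiv (j - i + 1) 2 - 1 - i).toNat < (j - i).toNat := by
  rw [PySem.Int.floordiv_eq_ediv_of_pos (by norm_num : (0:Int) < 2)]
  omega

lemma pvSplitR_lt (i j : Int) (h : i < j) :
    (j - (i + PySem.Int.floordiv (j - i + 1) 2)).toNat < (j - i).toNat := by
  rw [PySem.Int.floordiv_eq_ediv_of_pos (by norm_num : (0:Int) < 2)]
  omega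

-- _merge_layers(a, b)
def mergeLayers (a b : List (List (Int × Int))) : List (List (Int × Int)) :=
  let out := List.zipWith (fun x y => x ++ y) a b
  if a.length > b.length then out ++ a.drop b.length else out ++ b.drop a.length

-- _layers(i, j)
def layersB (i j : Int) : List (List (Int × Int)) :=
  if h : i < j then
    let m := i + PySem.Int.floordiv (j - i + 1) 2
    [[(i, j)]] ++ mergeLayers (layersB i (m - 1)) (layersB m j)
  else [[(i, j)]]
termination_by (j - i).toNat
decreasing_by
  · exact pvSplitL_lt i j h
  · exact pvSplitR_lt i j h

def get_all_balance_assignments_alt (start : Int) (end_ : Int) : List (Int × Int) :=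
  (layersB start end_).foldl (fun result level => result ++ level) []

-- ===== PRECONDITION & SPEC =====
def Spec_get_all_balance_assignments (start : Int) (end_ : Int) (out : List (Int × Int)) : Prop := out = get_all_balance_assignments_alt start end_
instance (start : Int) (end_ : Int) (out : List (Int × Int)) : Decidable (Spec_get_all_balance_assignments start end_ out) := by unfold Spec_get_all_balance_assignments; infer_instance

-- ===== CLAIM (what is proved, stated in full; the proofs are below) =====
def Claim_equal_get_all_balance_assignments : Prop := ∀ (start : Int) (end_ : Int), Dom_get_all_balance_assignments start end_ → Spec_get_all_balance_assignments start end_ (get_all_balance_assignments start end_)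

-- ===== LEMMAS AND PROOFS =====

-- layer decomposition of A's BFS: list of successive layers starting from xs
def LayersW (xs : List (Int × Int)) : List (List (Int × Int)) :=
  if xs = [] then [] else
    xs :: (if _h : pvNextL xs = [] then [] else LayersW (pvNextL xs))
termination_by pvMsum xs
decreasing_by exact pvMsum_nextL_lt xs _h

lemma LayersW_nil : LayersW [] = [] := by unfold LayersW; simp

lemma LayersW_eq (xs : List (Int × Int)) (hx : xs ≠ []) :
    LayersW xs = xs :: LayersW (pvNextL xs) := by
  conv_lhs => unfold LayersW
  simp only [hx, if_false]
  by_cases h : pvNextL xs = []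
  · simp [h, LayersW_nil]
  · simp [h]

lemma mergeLayers_nil_left (b : List (List (Int × Int))) : mergeLayers [] b = b := by
  unfold mergeLayers; simp

lemma mergeLayers_nil_right (a : List (List (Int × Int))) : mergeLayers a [] = a := by
  unfold mergeLayers
  cases a with
  | nil => simp
  | cons x a => simp

lemma mergeLayers_cons (x y : List (Int × Int)) (a b : List (List (Int × Int))) :
    mergeLayers (x :: a) (y :: b) = (x ++ y) :: mergeLayers a b := by
  unfold mergeLayers
  simp only [List.zipWith, List.length_cons, List.drop_succ_cons]
  split <;> split <;> simp_all

lemma pvNextL_append (xs ys : List (Int × Int)) :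
    pvNextL (xs ++ ys) = pvNextL xs ++ pvNextL ys := by
  unfold pvNextL; simp

lemma LayersW_append_bound (n : Nat) :
    ∀ xs ys : List (Int × Int), pvMsum (xs ++ ys) < n →
      LayersW (xs ++ ys) = mergeLayers (LayersW xs) (LayersW ys) := by
  induction n with
  | zero => intro xs ys h; omega
  | succ n ih =>
    intro xs ys h
    cases hxs : xs with
    | nil => simp [LayersW_nil, mergeLayers_nil_left]
    | cons p ps =>
      cases hys : ys with
      | nil => simp [LayersW_nil, mergeLayers_nil_right]
      | cons q qs =>
        subst hxs hys
        have hne : (p :: ps) ++ (q :: qs) ≠ [] := by simp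
        rw [LayersW_eq ((p :: ps) ++ (q :: qs)) hne, LayersW_eq (p :: ps) (by simp),
            LayersW_eq (q :: qs) (by simp), mergeLayers_cons, pvNextL_append]
        congr 1
        by_cases hz : pvNextL (p :: ps) ++ pvNextL (q :: qs) = []
        · have h1 : pvNextL (p :: ps) = [] := by
            cases hp : pvNextL (p :: ps) <;> simp_all
          have h2 : pvNextL (q :: qs) = [] := by simp_all
          rw [h1, h2]; simp [LayersW_nil, mergeLayers_nil_left]
        · apply ih
          have := pvMsum_nextL_lt ((p :: ps) ++ (q :: qs)) (by rwa [pvNextL_append])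
          rw [pvNextL_append] at this
          omega

lemma LayersW_append (xs ys : List (Int × Int)) :
    LayersW (xs ++ ys) = mergeLayers (LayersW xs) (LayersW ys) :=
  LayersW_append_bound (pvMsum (xs ++ ys) + 1) xs ys (by omega)

lemma pvNextL_single (i j : Int) : pvNextL [(i, j)] = nextAssign i j := by
  simp [pvNextL]

lemma LayersW_single_bound (n : Nat) :
    ∀ i j : Int, (j - i).toNat < n → LayersW [(i, j)] = layersB i j := by
  induction n with
  | zero => intro i j h; omega
  | succ n ih =>
    intro i j h
    rw [LayersW_eq _ (by simp), pvNextL_single]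
    by_cases hij : i < j
    · have hcond : i ≠ j ∧ i < j := ⟨by omega, hij⟩
      have hna : nextAssign i j =
          [(i, i + PySem.Int.floordiv (j - i + 1) 2 - 1)] ++
          [(i + PySem.Int.floordiv (j - i + 1) 2, j)] := by
        unfold nextAssign; simp [hcond]
      rw [hna, LayersW_append,
          ih _ _ (by have := pvSplitL_lt i j hij; omega),
          ih _ _ (by have := pvSplitR_lt i j hij; omega)]
      conv_rhs => unfold layersB
      simp [hij]
    · have hna : nextAssign i j = [] := by
        unfold nextAssign
        have hcond : ¬(i ≠ j ∧ i < j) := fun hc => hij hc.2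
        rw [if_neg hcond]
      rw [hna, LayersW_nil]
      conv_rhs => unfold layersB
      simp [hij]

lemma LayersW_single (i j : Int) : LayersW [(i, j)] = layersB i j :=
  LayersW_single_bound ((j - i).toNat + 1) i j (by omega)

lemma foldl_append_flatten (xs : List (List (Int × Int))) (acc : List (Int × Int)) :
    xs.foldl (fun r l => r ++ l) acc = acc ++ xs.flatten := by
  induction xs generalizing acc with
  | nil => simp
  | cons x xs ih => simp [ih]

lemma loopA_eq_bound (n : Nat) :
    ∀ xs acc : List (Int × Int), pvMsum xs < n → xs ≠ [] →
      loopA acc xs = acc ++ (LayersW xs).flatten := by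
  induction n with
  | zero => intro xs acc h; omega
  | succ n ih =>
    intro xs acc h hne
    rw [loopA.eq_def]
    simp only [buildNext_eq]
    rw [LayersW_eq xs hne]
    by_cases hz : pvNextL xs = []
    · simp [hz, LayersW_nil]
    · have hlen : 0 < (pvNextL xs).length := List.length_pos_iff.mpr hz
      simp only [if_pos hlen]
      rw [ih (pvNextL xs) (acc ++ xs) (by have := pvMsum_nextL_lt xs hz; omega) hz]
      simp

lemma loopA_eq (xs acc : List (Int × Int)) (hne : xs ≠ []) :
    loopA acc xs = acc ++ (LayersW xs).flatten :=
  loopA_eq_bound (pvMsum xs + 1) xs acc (by omega) hne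

-- ===== VERDICT (by name: the statement is the Claim_ definition above) =====
theorem get_all_balance_assignments_spec : Claim_equal_get_all_balance_assignments := by
  intro start end_ _hdom
  unfold Spec_get_all_balance_assignments
  unfold get_all_balance_assignments get_all_balance_assignments_alt
  simp only [List.length_cons, List.length_nil]
  rw [if_pos (by omega)]
  rw [loopA_eq [(start, end_)] [] (by simp), LayersW_single, foldl_append_flatten]
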